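-- pv_equiv track=rewrite | github.com/LeeAckersonIV/genome-asm | helper-scripts/asm-path-fixer.py | convert_verkko_path
-- ===== SOURCE A (Python) =====
-- def convert_verkko_path(path_str): # translates +/- to >/<
--     converted = []
--     for segment in path_str.split(','):
--         if segment.endswith('-'):
--             converted.append(f'<{segment[:-1]}')
--         elif segment.endswith('+'):
--             converted.append(f'>{segment[:-1]}')
--         else:
--             converted.append(segment)  # catch unexpected format
--     return ''.join(converted)
-- ===== SOURCE B (Python) =====
-- def convert_verkko_path(path_str):
--     # Single right-to-left character scan: a trailing '+'/'-' of a segment is held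
--     # as a pending '>'/'<' and emitted when the segment's left edge (a comma or
--     # the start of the string) is reached; commas are dropped; the output is
--     # built back-to-front and reversed once at the end.
--     acc = []
--     pending = ''
--     at_end = True
--     for ch in reversed(path_str):
--         if at_end and (ch == '+' or ch == '-'):
--             pending = '>' if ch == '+' else '<'
--             at_end = False
--         elif ch == ',':
--             if pending:
--                 acc.append(pending)
--                 pending = ''
--             at_end = True
--         else:
--             acc.append(ch)
--             at_end = False
--     if pending:
--         acc.append(pending)
--     acc.reverse()
--     return ''.join(acc)
-- ===== Notes on version B (the rewrite author's own statement) =====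
-- stated objective: alternative
-- what changed: Replaces the split-into-segments/branch/join pipeline by a single right-to-left character-level state machine that holds a pending sign ('>'/'<') and emits it at each segment's left edge, building the output back-to-front with one final reverse.
import Mathlib
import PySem

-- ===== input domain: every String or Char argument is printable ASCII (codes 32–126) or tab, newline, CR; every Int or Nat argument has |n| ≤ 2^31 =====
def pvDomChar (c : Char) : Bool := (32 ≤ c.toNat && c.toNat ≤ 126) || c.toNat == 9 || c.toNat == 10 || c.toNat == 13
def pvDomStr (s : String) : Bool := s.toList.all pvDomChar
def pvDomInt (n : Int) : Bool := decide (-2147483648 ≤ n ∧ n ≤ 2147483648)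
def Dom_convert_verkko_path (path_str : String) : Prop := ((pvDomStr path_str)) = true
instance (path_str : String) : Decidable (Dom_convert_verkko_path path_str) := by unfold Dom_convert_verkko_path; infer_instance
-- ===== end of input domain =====

-- B replaces A's split/branch/join pipeline by a single right-to-left character scan with a
-- pending-sign state machine, building the output back-to-front (objective: alternative, same cost).

-- ===== PORT A =====
-- literal transliteration of A: split on ',', per-segment branch on endswith, append, join
def convert_verkko_path (path_str : String) : String :=
  let converted : List (List Char) :=
    (PySem.Chars.splitOn path_str.toList [',']).foldl
      (fun acc segment =>
        if PySem.Chars.endswith segment ['-'] then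
          acc ++ ['<' :: PySem.Chars.slice segment none (some (-1))]
        else if PySem.Chars.endswith segment ['+'] then
          acc ++ ['>' :: PySem.Chars.slice segment none (some (-1))]
        else acc ++ [segment])
      []
  String.mk (PySem.Chars.join [] converted)

-- ===== PORT B =====
-- Source B's for-loop over reversed(path_str) with its three-way branch and the final pending
-- flush; `pending` ('' or one char) is an Option Char, acc.append is `++ [·]`
def pvScan (cs : List Char) (acc : List Char) (pending : Option Char) (atEnd : Bool) : List Char :=
  match cs with
  | [] =>
    match pending with
    | some p => acc ++ [p]
    | none => acc
  | ch :: rest =>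
    if atEnd ∧ (ch = '+' ∨ ch = '-') then
      pvScan rest acc (some (if ch = '+' then '>' else '<')) false
    else if ch = ',' then
      match pending with
      | some p => pvScan rest (acc ++ [p]) none true
      | none => pvScan rest acc none true
    else pvScan rest (acc ++ [ch]) pending false

def convert_verkko_path_alt (path_str : String) : String :=
  String.mk (pvScan path_str.toList.reverse [] none true).reverse

-- ===== PRECONDITION & SPEC =====
def Spec_convert_verkko_path (path_str : String) (out : String) : Prop := out = convert_verkko_path_alt path_str
instance (path_str : String) (out : String) : Decidable (Spec_convert_verkko_path path_str out) := by unfold Spec_convert_verkko_path; infer_instance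

-- ===== CLAIM (what is proved, stated in full; the proofs are below) =====
def Claim_equal_convert_verkko_path : Prop := ∀ (path_str : String), Dom_convert_verkko_path path_str → Spec_convert_verkko_path path_str (convert_verkko_path path_str)

-- ===== LEMMAS AND PROOFS =====

-- reference splitter on ',' and A's per-segment transform
def pvSplit1 : List Char → List (List Char)
  | [] => [[]]
  | c :: rest =>
    if c = ',' then [] :: pvSplit1 rest
    else
      match pvSplit1 rest with
      | p :: ps => (c :: p) :: ps
      | [] => [[c]]

def pvASeg (segment : List Char) : List Char :=
  if PySem.Chars.endswith segment ['-'] then '<' :: PySem.Chars.slice segment none (some (-1))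
  else if PySem.Chars.endswith segment ['+'] then '>' :: PySem.Chars.slice segment none (some (-1))
  else segment

def pvPrep (x : List Char) : List (List Char) → List (List Char)
  | [] => [x]
  | p :: ps => (x ++ p) :: ps

theorem pvSplit1_ne_nil (s : List Char) : pvSplit1 s ≠ [] := by
  cases s with
  | nil => simp [pvSplit1]
  | cons c rest =>
    by_cases hc : c = ','
    · simp [pvSplit1, hc]
    · simp only [pvSplit1, if_neg hc]
      cases pvSplit1 rest <;> simp

theorem pvPrep_nil (L : List (List Char)) (h : L ≠ []) : pvPrep [] L = L := by
  cases L with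
  | nil => exact absurd rfl h
  | cons p ps => simp [pvPrep]

theorem pvGo_spec (fuel : Nat) :
    ∀ (l cur : List Char) (acc : List (List Char)), l.length < fuel →
      PySem.Chars.splitOn.go [','] fuel l cur acc =
        acc.reverse ++ pvPrep cur.reverse (pvSplit1 l) := by
  induction fuel with
  | zero => intro l cur acc h; omega
  | succ f ih =>
    intro l cur acc h
    cases l with
    | nil =>
      simp [PySem.Chars.splitOn.go, pvSplit1, pvPrep]
    | cons c rest =>
      by_cases hc : c = ','
      · subst hc
        have h1 : [','].isPrefixOf (',' :: rest) = true := by simp [List.isPrefixOf]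
        rw [PySem.Chars.splitOn.go]
        simp only [h1, List.length_singleton, List.drop_succ_cons, List.drop_zero]
        rw [ih rest [] (cur.reverse :: acc) (by simpa using Nat.lt_of_succ_lt_succ h)]
        rw [List.reverse_nil, pvPrep_nil _ (pvSplit1_ne_nil rest)]
        simp [pvSplit1, pvPrep]
      · have h1 : [','].isPrefixOf (c :: rest) = false := by
          simp [List.isPrefixOf]
          exact fun hh => absurd hh.symm hc
        rw [PySem.Chars.splitOn.go]
        simp only [h1, Bool.false_eq_true, if_false]
        rw [ih rest (c :: cur) acc (by simpa using Nat.lt_of_succ_lt_succ h)]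
        simp only [pvSplit1, if_neg hc]
        cases hv : pvSplit1 rest with
        | nil => exact absurd hv (pvSplit1_ne_nil rest)
        | cons p ps => simp [pvPrep]

theorem pvSplitOn_eq (s : List Char) : PySem.Chars.splitOn s [','] = pvSplit1 s := by
  rw [PySem.Chars.splitOn, pvGo_spec (s.length + 1) s [] [] (by omega)]
  simp [pvPrep_nil _ (pvSplit1_ne_nil s)]

theorem pvA_foldl (xs : List (List Char)) (acc : List (List Char)) :
    xs.foldl
      (fun acc segment =>
        if PySem.Chars.endswith segment ['-'] then
          acc ++ ['<' :: PySem.Chars.slice segment none (some (-1))]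
        else if PySem.Chars.endswith segment ['+'] then
          acc ++ ['>' :: PySem.Chars.slice segment none (some (-1))]
        else acc ++ [segment])
      acc = acc ++ xs.map pvASeg := by
  induction xs generalizing acc with
  | nil => simp
  | cons x xs ih =>
    simp only [List.foldl_cons, List.map_cons, ih, pvASeg]
    split_ifs <;> simp

-- pvASeg on a segment written as xs ++ [c]
theorem pvInitSlice (xs : List Char) (c : Char) :
    PySem.List.slice (xs ++ [c]) none (some (-1)) = xs := by
  rw [PySem.List.slice_to_neg_one]
  simp

theorem pvASeg_snoc_minus (xs : List Char) : pvASeg (xs ++ ['-']) = '<' :: xs := by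
  simp [pvASeg, PySem.Chars.endswith, List.isSuffixOf, List.isPrefixOf, pvInitSlice]

theorem pvASeg_snoc_plus (xs : List Char) : pvASeg (xs ++ ['+']) = '>' :: xs := by
  simp [pvASeg, PySem.Chars.endswith, List.isSuffixOf, List.isPrefixOf, pvInitSlice]

theorem pvASeg_snoc_other (xs : List Char) (c : Char) (h1 : c ≠ '-') (h2 : c ≠ '+') :
    pvASeg (xs ++ [c]) = xs ++ [c] := by
  have hs : ∀ x : Char, PySem.Chars.endswith (xs ++ [c]) [x] = (x == c) := by
    intro x; simp [PySem.Chars.endswith, List.isSuffixOf, List.isPrefixOf]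
  simp [pvASeg, hs, Ne.symm h1, Ne.symm h2]

-- step lemmas unfolding one iteration of pvScan
theorem pvScan_nil (acc : List Char) (pend : Option Char) (b : Bool) :
    pvScan [] acc pend b = acc ++ pend.toList := by
  cases pend <;> simp [pvScan]

theorem pvScan_step_minus (rest acc : List Char) (pend : Option Char) :
    pvScan ('-' :: rest) acc pend true = pvScan rest acc (some '<') false := by
  simp [pvScan]

theorem pvScan_step_plus (rest acc : List Char) (pend : Option Char) :
    pvScan ('+' :: rest) acc pend true = pvScan rest acc (some '>') false := by
  simp [pvScan]

theorem pvScan_step_comma (rest acc : List Char) (pend : Option Char) (b : Bool) :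
    pvScan (',' :: rest) acc pend b = pvScan rest (acc ++ pend.toList) none true := by
  cases pend <;> simp [pvScan]

theorem pvScan_step_other (ch : Char) (rest acc : List Char) (pend : Option Char) (b : Bool)
    (hc : ch ≠ ',') (hb : b = true → ch ≠ '+' ∧ ch ≠ '-') :
    pvScan (ch :: rest) acc pend b = pvScan rest (acc ++ [ch]) pend false := by
  cases b with
  | false => simp [pvScan, hc]
  | true =>
    have h := hb rfl
    simp [pvScan, hc, h.1, h.2]

-- interior chars (atEnd = false): every char of a comma-free block is just appended
theorem pvScan_interior (l : List Char) (tail acc : List Char) (pend : Option Char)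
    (h : ',' ∉ l) : pvScan (l ++ tail) acc pend false = pvScan tail (acc ++ l) pend false := by
  induction l generalizing acc with
  | nil => simp
  | cons c rest ih =>
    simp at h
    rw [List.cons_append, pvScan_step_other c (rest ++ tail) acc pend false
      (Ne.symm h.1) (by simp)]
    simpa using ih (acc ++ [c]) h.2

-- one segment (comma-free), followed by end of input: scan emits (pvASeg seg).reverse
theorem pvScan_seg_nil (seg acc : List Char) (h : ',' ∉ seg) :
    pvScan seg.reverse acc none true = acc ++ (pvASeg seg).reverse := by
  induction seg using List.reverseRecOn with
  | nil => simp [pvScan_nil, pvASeg, PySem.Chars.endswith, List.isSuffixOf]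
  | append_singleton xs c _ =>
    simp at h
    by_cases h1 : c = '-' <;> by_cases h2 : c = '+'
    · exact absurd (h1 ▸ h2) (by decide)
    · subst h1
      rw [List.reverse_append, List.reverse_singleton, List.singleton_append,
        pvScan_step_minus, ← List.append_nil xs.reverse,
        pvScan_interior xs.reverse [] acc (some '<') (by simp [h.1]), pvScan_nil]
      simp [pvASeg_snoc_minus]
    · subst h2
      rw [List.reverse_append, List.reverse_singleton, List.singleton_append,
        pvScan_step_plus, ← List.append_nil xs.reverse,
        pvScan_interior xs.reverse [] acc (some '>') (by simp [h.1]), pvScan_nil]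
      simp [pvASeg_snoc_plus]
    · rw [List.reverse_append, List.reverse_singleton, List.singleton_append,
        pvScan_step_other c (xs.reverse) acc none true (Ne.symm h.2) (fun _ => ⟨h2, h1⟩),
        ← List.append_nil xs.reverse,
        pvScan_interior xs.reverse [] (acc ++ [c]) none (by simp [h.1]), pvScan_nil]
      simp [pvASeg_snoc_other xs c h1 h2]

-- one segment followed by a comma: scan emits (pvASeg seg).reverse and restarts fresh
theorem pvScan_seg_comma (seg acc y : List Char) (h : ',' ∉ seg) :
    pvScan (seg.reverse ++ ',' :: y) acc none true
      = pvScan y (acc ++ (pvASeg seg).reverse) none true := by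
  induction seg using List.reverseRecOn with
  | nil =>
    rw [List.reverse_nil, List.nil_append, pvScan_step_comma]
    simp [pvASeg, PySem.Chars.endswith, List.isSuffixOf]
  | append_singleton xs c _ =>
    simp at h
    by_cases h1 : c = '-' <;> by_cases h2 : c = '+'
    · exact absurd (h1 ▸ h2) (by decide)
    · subst h1
      rw [List.reverse_append, List.reverse_singleton, List.singleton_append, List.cons_append,
        pvScan_step_minus,
        pvScan_interior xs.reverse (',' :: y) acc (some '<') (by simp [h.1]),
        pvScan_step_comma]
      simp [pvASeg_snoc_minus]
    · subst h2
      rw [List.reverse_append, List.reverse_singleton, List.singleton_append, List.cons_append,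
        pvScan_step_plus,
        pvScan_interior xs.reverse (',' :: y) acc (some '>') (by simp [h.1]),
        pvScan_step_comma]
      simp [pvASeg_snoc_plus]
    · rw [List.reverse_append, List.reverse_singleton, List.singleton_append, List.cons_append,
        pvScan_step_other c (xs.reverse ++ ',' :: y) acc none true (Ne.symm h.2)
          (fun _ => ⟨h2, h1⟩),
        pvScan_interior xs.reverse (',' :: y) (acc ++ [c]) none (by simp [h.1]),
        pvScan_step_comma]
      simp [pvASeg_snoc_other xs c h1 h2]

-- ''.join(parts) is concatenation
theorem pvJoinNil (L : List (List Char)) : PySem.Chars.join [] L = L.flatten := by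
  induction L with
  | nil => simp [PySem.Chars.join_nil]
  | cons x r ih =>
    cases r with
    | nil => simp [PySem.Chars.join_singleton]
    | cons y s => rw [PySem.Chars.join_cons_cons, ih]; simp

theorem pvSplit1_no_comma (s : List Char) (h : ',' ∉ s) : pvSplit1 s = [s] := by
  induction s with
  | nil => simp [pvSplit1]
  | cons c cs ih =>
    simp at h
    simp only [pvSplit1, if_neg (Ne.symm h.1), ih h.2]

-- splitting at the LAST comma
theorem pvSplit1_last (h t : List Char) (ht : ',' ∉ t) :
    pvSplit1 (h ++ ',' :: t) = pvSplit1 h ++ [t] := by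
  induction h with
  | nil => simp [pvSplit1, pvSplit1_no_comma t ht]
  | cons c cs ih =>
    by_cases hc : c = ','
    · subst hc; simp [pvSplit1, ih]
    · simp only [List.cons_append, pvSplit1, if_neg hc, ih]
      cases hv : pvSplit1 cs with
      | nil => exact absurd hv (pvSplit1_ne_nil cs)
      | cons p ps => simp

-- last-comma decomposition
theorem pvLastComma (s : List Char) (h : ',' ∈ s) :
    ∃ a b, s = a ++ ',' :: b ∧ ',' ∉ b := by
  induction s using List.reverseRecOn with
  | nil => simp at h
  | append_singleton xs c ih =>
    by_cases hc : c = ','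
    · exact ⟨xs, [], by simp [hc], by simp⟩
    · have hx : ',' ∈ xs := by
        rcases List.mem_append.1 h with h' | h'
        · exact h'
        · simp at h'; exact absurd h'.symm hc
      obtain ⟨a, b, hab, hb⟩ := ih hx
      exact ⟨a, b ++ [c], by simp [hab], by simp [hb, Ne.symm hc]⟩

-- main scan lemma, by strong induction on length
theorem pvScan_main (n : Nat) : ∀ (s acc : List Char), s.length ≤ n →
    pvScan s.reverse acc none true
      = acc ++ (((pvSplit1 s).map pvASeg).flatten).reverse := by
  induction n with
  | zero =>
    intro s acc h
    have : s = [] := List.eq_nil_of_length_eq_zero (Nat.le_zero.1 h)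
    subst this
    simp [pvScan_nil, pvSplit1, pvASeg, PySem.Chars.endswith, List.isSuffixOf]
  | succ m ih =>
    intro s acc h
    by_cases hm : ',' ∈ s
    · obtain ⟨a, b, hab, hb⟩ := pvLastComma s hm
      subst hab
      have hrev : (a ++ ',' :: b).reverse = b.reverse ++ ',' :: a.reverse := by simp
      rw [hrev, pvScan_seg_comma b acc a.reverse hb,
        ih a (acc ++ (pvASeg b).reverse) (by simp at h; omega),
        pvSplit1_last a b hb]
      simp
    · rw [pvScan_seg_nil s acc hm, pvSplit1_no_comma s hm]
      simp

-- ===== VERDICT (by name: the statement is the Claim_ definition above) =====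
theorem convert_verkko_path_spec : Claim_equal_convert_verkko_path := by
  intro path_str _
  unfold Spec_convert_verkko_path convert_verkko_path convert_verkko_path_alt
  rw [pvSplitOn_eq, pvA_foldl,
    pvScan_main path_str.toList.length path_str.toList [] (le_refl _)]
  simp [pvJoinNil]
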